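-- pv_equiv track=rewrite | github.com/leaningtech/cheerp-test | helpers/determinism_wrapper_compile_only.py | requirements_satisfied
-- ===== SOURCE A (Python) =====
-- def requirements_satisfied(requirements: set[str], available: set[str]) -> bool:
--     if not requirements:
--         return True
--
--     for req in requirements:
--         if req.startswith("!"):
--             feat = req[1:]
--             if feat and feat in available:
--                 return False
--             continue
--         if req not in available:
--             return False
--     return True
-- ===== SOURCE B (Python) =====
-- def _sorted_subset(xs, ys):
--     # xs, ys sorted ascending: merge scan testing every x appears in ys
--     i = j = 0
--     while i < len(xs):
--         if j < len(ys) and ys[j] < xs[i]: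
--             j += 1
--         elif j < len(ys) and ys[j] == xs[i]:
--             i += 1
--         else:
--             return False
--     return True
--
--
-- def _sorted_overlap(xs, ys):
--     # xs, ys sorted ascending: merge scan testing for any common element
--     i = j = 0
--     while i < len(xs) and j < len(ys):
--         if xs[i] == ys[j]:
--             return True
--         if xs[i] < ys[j]:
--             i += 1
--         else:
--             j += 1
--     return False
--
--
-- def requirements_satisfied(requirements: set[str], available: set[str]) -> bool:
--     av = sorted(available)
--     pos = sorted(r for r in requirements if not r.startswith("!"))
--     neg = sorted(r[1:] for r in requirements if r.startswith("!") and len(r) > 1)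
--     return _sorted_subset(pos, av) and not _sorted_overlap(neg, av)
-- ===== Notes on version B (the rewrite author's own statement) =====
-- stated objective: alternative
-- what changed: Replaced the per-requirement hash-membership loop with a sort-then-merge algorithm: requirements are split into sorted positive and negated-feature lists, available is sorted once, and the answer comes from a two-pointer merge subset test plus a two-pointer merge disjointness test with no membership lookups at all.
import Mathlib
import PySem

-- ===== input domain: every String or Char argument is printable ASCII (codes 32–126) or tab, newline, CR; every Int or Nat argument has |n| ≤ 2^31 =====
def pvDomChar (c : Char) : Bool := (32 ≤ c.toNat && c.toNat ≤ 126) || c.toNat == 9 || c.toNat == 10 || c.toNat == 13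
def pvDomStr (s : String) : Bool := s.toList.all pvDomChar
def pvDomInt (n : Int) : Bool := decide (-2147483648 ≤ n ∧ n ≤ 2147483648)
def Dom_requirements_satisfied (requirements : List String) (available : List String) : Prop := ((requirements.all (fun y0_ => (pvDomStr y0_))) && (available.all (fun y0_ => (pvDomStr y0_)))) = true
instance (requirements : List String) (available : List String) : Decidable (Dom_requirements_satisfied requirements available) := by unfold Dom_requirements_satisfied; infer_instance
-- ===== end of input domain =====

-- B replaces A's per-requirement membership loop by sort-then-merge: sorted positive/negated lists and a sorted available list
-- are compared by two-pointer merge scans (objective: alternative; no speed claim).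


-- ===== PORT A =====
-- the 'for req in requirements: … return False' loop, early exit kept as structural recursion
def reqLoop (available : List String) : List String → Bool
  | [] => true
  | req :: rest =>
    if PySem.Str.startswith req "!" then
      let feat := PySem.Str.slice req (some 1) none
      if feat ≠ "" && PySem.Set.contains available feat then false
      else reqLoop available rest
    else
      if !PySem.Set.contains available req then false
      else reqLoop available rest

def requirements_satisfied (requirements : List String) (available : List String) : Bool :=
  if requirements.isEmpty then true
  else reqLoop available requirements

-- ===== PORT B =====
-- strings are compared through List Char (PySem's list side of String; same lexicographic order as Python's str <)
-- two-pointer merge: does every element of sorted xs occur in sorted ys?  (advancing a pointer = dropping a head)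
def sortedSubset : List (List Char) → List (List Char) → Bool
  | [], _ => true
  | _ :: _, [] => false
  | x :: xs, y :: ys =>
    if y < x then sortedSubset (x :: xs) ys
    else if y = x then sortedSubset xs (y :: ys)
    else false
termination_by xs ys => xs.length + ys.length

-- two-pointer merge: do sorted xs and sorted ys share an element?
def sortedOverlap : List (List Char) → List (List Char) → Bool
  | [], _ => false
  | _ :: _, [] => false
  | x :: xs, y :: ys =>
    if x = y then true
    else if x < y then sortedOverlap xs (y :: ys)
    else sortedOverlap (x :: xs) ys
termination_by xs ys => xs.length + ys.length

def requirements_satisfied_alt (requirements : List String) (available : List String) : Bool :=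
  let av := PySem.List.sorted (available.map (fun s => s.toList)) (fun x => x) false
  let pos := PySem.List.sorted
    ((requirements.filter (fun r => !PySem.Str.startswith r "!")).map (fun s => s.toList)) (fun x => x) false
  let neg := PySem.List.sorted
    ((requirements.filter (fun r => PySem.Str.startswith r "!" && decide (1 < PySem.Str.len r))).map
      (fun r => (PySem.Str.slice r (some 1) none).toList)) (fun x => x) false
  sortedSubset pos av && !(sortedOverlap neg av)

-- ===== PRECONDITION & SPEC =====
def Spec_requirements_satisfied (requirements : List String) (available : List String) (out : Bool) : Prop := out = requirements_satisfied_alt requirements available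
instance (requirements : List String) (available : List String) (out : Bool) : Decidable (Spec_requirements_satisfied requirements available out) := by unfold Spec_requirements_satisfied; infer_instance

-- ===== CLAIM (what is proved, stated in full; the proofs are below) =====
def Claim_equal_requirements_satisfied : Prop := ∀ (requirements : List String) (available : List String), Dom_requirements_satisfied requirements available → Spec_requirements_satisfied requirements available (requirements_satisfied requirements available)

-- ===== LEMMAS AND PROOFS =====

-- per-element condition of A's loop body
def pvGood (available : List String) (r : String) : Bool :=
  if PySem.Str.startswith r "!" then
    !(PySem.Str.slice r (some 1) none ≠ "" && PySem.Set.contains available (PySem.Str.slice r (some 1) none))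
  else PySem.Set.contains available r

theorem reqLoop_eq_all (available : List String) (l : List String) :
    reqLoop available l = l.all (pvGood available) := by
  induction l with
  | nil => rfl
  | cons r rest ih =>
    rw [List.all_cons, ← ih]
    show (if PySem.Str.startswith r "!" then _ else _) = _
    unfold pvGood
    by_cases h1 : PySem.Str.startswith r "!" = true
    · rw [if_pos h1, if_pos h1]
      by_cases h2 : (PySem.Str.slice r (some 1) none ≠ "" && PySem.Set.contains available (PySem.Str.slice r (some 1) none)) = true
      · rw [if_pos h2, h2]; rfl
      · rw [if_neg h2, Bool.eq_false_iff.mpr h2]; rfl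
    · rw [if_neg h1, if_neg h1]
      by_cases h2 : PySem.Set.contains available r = true
      · rw [h2]; simp
      · rw [Bool.eq_false_iff.mpr h2]; simp

theorem a_true_iff (requirements available : List String) :
    requirements_satisfied requirements available = true ↔
      ∀ r ∈ requirements, pvGood available r = true := by
  unfold requirements_satisfied
  split_ifs with h
  · simp [List.isEmpty_iff.mp h]
  · simp [reqLoop_eq_all, List.all_eq_true]

theorem pvFeat_toList (r : String) :
    (PySem.Str.slice r (some 1) none).toList = r.toList.drop 1 := by
  rw [PySem.Str.toList_slice, PySem.Chars.slice_eq_listSlice,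
    show (1 : Int) = ((1 : Nat) : Int) from rfl, PySem.List.slice_from_natCast]

theorem pvFeat_ne_empty_iff (r : String) :
    (PySem.Str.slice r (some 1) none ≠ "") ↔ 1 < PySem.Str.len r := by
  rw [ne_eq, ← String.toList_inj, pvFeat_toList, PySem.Str.len_eq]
  simp only [String.toList_empty, List.drop_eq_nil_iff]
  omega

-- core's List.lt and Mathlib's linear order on List Char are the same lexicographic order
theorem lt_bridge (a b : List Char) :
    (@LT.lt _ List.instLT a b) ↔ (@LT.lt _ List.instLinearOrder.toLT a b) := by
  show List.lt a b ↔ _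
  rw [List.lt_iff_lex_lt]
  exact Iff.rfl

-- sorted is insensitive to which of the two (equivalent) DecidableLT instances elaboration picked
theorem sorted_core_eq (xs : List (List Char)) :
    @PySem.List.sorted (List Char) (List Char) List.instLT (fun a b => a.decidableLT b) xs (fun x => x) false
      = @PySem.List.sorted (List Char) (List Char) List.instLinearOrder.toLT LinearOrder.toDecidableLT xs (fun x => x) false := by
  rw [@PySem.List.sorted_eq_foldl_insertBy (List Char) (List Char) List.instLT (fun a b => a.decidableLT b) xs (fun x => x),
    @PySem.List.sorted_eq_foldl_insertBy (List Char) (List Char) List.instLinearOrder.toLT LinearOrder.toDecidableLT xs (fun x => x)]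
  congr 1
  funext acc x
  congr 1
  funext a b
  exact decide_eq_decide.mpr (lt_bridge a b)

-- correctness of the merge subset scan on sorted inputs
theorem sortedSubset_iff (xs ys : List (List Char))
    (hxs : xs.Pairwise (· ≤ ·)) (hys : ys.Pairwise (· ≤ ·)) :
    sortedSubset xs ys = true ↔ ∀ x ∈ xs, x ∈ ys := by
  fun_induction sortedSubset xs ys with
  | case1 ys => simp
  | case2 x xs =>
    simp only [Bool.false_eq_true, false_iff]
    intro h
    exact absurd (h x List.mem_cons_self) (List.not_mem_nil)
  | case3 x xs y ys hlt ih =>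
    rw [ih hxs hys.tail]
    constructor
    · intro h m hm
      exact List.mem_cons_of_mem y (h m hm)
    · intro h m hm
      rcases List.mem_cons.mp (h m hm) with rfl | hmem
      · exfalso
        have hxm : x ≤ m := by
          rcases List.mem_cons.mp hm with rfl | hm'
          · exact le_refl _
          · exact (List.pairwise_cons.mp hxs).1 m hm'
        exact absurd (lt_of_lt_of_le hlt hxm) (lt_irrefl _)
      · exact hmem
  | case4 xs y ys hlt ih =>
    rw [ih hxs.tail hys]
    constructor
    · intro h m hm
      rcases List.mem_cons.mp hm with rfl | hm'
      · exact List.mem_cons_self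
      · exact h m hm'
    · intro h m hm
      exact h m (List.mem_cons_of_mem y hm)
  | case5 x xs y ys hlt heq =>
    simp only [Bool.false_eq_true, false_iff]
    intro h
    have hx : x ∈ y :: ys := h x List.mem_cons_self
    have hyx : y < x ∨ y = x → False := by rintro (h'|h') <;> [exact hlt h'; exact heq h']
    rcases List.mem_cons.mp hx with rfl | hx'
    · exact hyx (Or.inr rfl)
    · have : y ≤ x := (List.pairwise_cons.mp hys).1 x hx'
      rcases lt_or_eq_of_le this with h' | h'
      · exact hyx (Or.inl h')
      · exact hyx (Or.inr h')

-- correctness of the merge intersection scan on sorted inputs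
theorem sortedOverlap_iff (xs ys : List (List Char))
    (hxs : xs.Pairwise (· ≤ ·)) (hys : ys.Pairwise (· ≤ ·)) :
    sortedOverlap xs ys = true ↔ ∃ c, c ∈ xs ∧ c ∈ ys := by
  fun_induction sortedOverlap xs ys with
  | case1 ys => simp
  | case2 x xs => simp
  | case3 xs y ys =>
    exact iff_of_true rfl ⟨y, List.mem_cons_self, List.mem_cons_self⟩
  | case4 x xs y ys heq hlt ih =>
    rw [ih hxs.tail hys]
    constructor
    · rintro ⟨c, hc1, hc2⟩
      exact ⟨c, List.mem_cons_of_mem x hc1, hc2⟩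
    · rintro ⟨c, hc1, hc2⟩
      refine ⟨c, ?_, hc2⟩
      rcases List.mem_cons.mp hc1 with rfl | hc1'
      · exfalso
        rcases List.mem_cons.mp hc2 with rfl | hc2'
        · exact heq rfl
        · have : y ≤ c := (List.pairwise_cons.mp hys).1 c hc2'
          exact absurd (lt_of_lt_of_le hlt this) (lt_irrefl _)
      · exact hc1'
  | case5 x xs y ys heq hlt ih =>
    rw [ih hxs hys.tail]
    constructor
    · rintro ⟨c, hc1, hc2⟩
      exact ⟨c, hc1, List.mem_cons_of_mem y hc2⟩
    · rintro ⟨c, hc1, hc2⟩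
      refine ⟨c, hc1, ?_⟩
      have hyx : y < x := by
        rcases lt_trichotomy x y with h'|h'|h'
        · exact absurd h' hlt
        · exact absurd h' heq
        · exact h'
      rcases List.mem_cons.mp hc2 with rfl | hc2'
      · exfalso
        rcases List.mem_cons.mp hc1 with rfl | hc1'
        · exact heq rfl
        · have : x ≤ c := (List.pairwise_cons.mp hxs).1 c hc1'
          exact absurd (lt_of_lt_of_le hyx this) (lt_irrefl _)
      · exact hc2'

theorem alt_true_iff (requirements available : List String) :
    requirements_satisfied_alt requirements available = true ↔
      ∀ r ∈ requirements, pvGood available r = true := by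
  unfold requirements_satisfied_alt
  rw [sorted_core_eq, sorted_core_eq, sorted_core_eq]
  rw [Bool.and_eq_true, Bool.not_eq_true', Bool.eq_false_iff, ne_eq,
    sortedSubset_iff _ _ (PySem.List.sorted_pairwise _ _) (PySem.List.sorted_pairwise _ _),
    sortedOverlap_iff _ _ (PySem.List.sorted_pairwise _ _) (PySem.List.sorted_pairwise _ _)]
  simp only [PySem.List.mem_sorted, List.mem_map, List.mem_filter, not_exists, not_and]
  constructor
  · rintro ⟨hpos, hneg⟩ r hr
    unfold pvGood
    by_cases hsw : PySem.Str.startswith r "!" = true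
    · rw [if_pos hsw]
      by_cases hlen : 1 < PySem.Str.len r
      · have hnot := hneg ((PySem.Str.slice r (some 1) none).toList)
          ⟨r, ⟨hr, by rw [hsw]; simpa using hlen⟩, rfl⟩
        have hcon : PySem.Set.contains available (PySem.Str.slice r (some 1) none) = false := by
          rw [Bool.eq_false_iff, ne_eq, PySem.Set.contains_iff]
          intro hmem
          exact hnot _ hmem rfl
        rw [hcon, Bool.and_false]
        rfl
      · have h0 : ¬ (PySem.Str.slice r (some 1) none ≠ "") :=
          fun h => hlen ((pvFeat_ne_empty_iff r).mp h)
        simp only [ne_eq, not_not] at h0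
        simp [h0]
    · rw [if_neg hsw]
      obtain ⟨s, hs, hseq⟩ := hpos (r.toList)
        ⟨r, ⟨hr, by simp [Bool.not_eq_true] at hsw ⊢; exact hsw⟩, rfl⟩
      rw [PySem.Set.contains_iff]
      rwa [String.toList_inj.mp hseq] at hs
  · intro h
    refine ⟨?_, ?_⟩
    · rintro m ⟨rr, ⟨hr, hns⟩, rfl⟩
      have hg := h rr hr
      unfold pvGood at hg
      rw [if_neg (by simpa using hns)] at hg
      rw [PySem.Set.contains_iff] at hg
      exact ⟨rr, hg, rfl⟩
    · rintro m ⟨rr, ⟨hr, hcond⟩, rfl⟩ s hs hseq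
      have hg := h rr hr
      unfold pvGood at hg
      rw [Bool.and_eq_true] at hcond
      obtain ⟨hsw, hlen'⟩ := hcond
      rw [decide_eq_true_eq] at hlen'
      rw [if_pos hsw] at hg
      have hne : PySem.Str.slice rr (some 1) none ≠ "" := (pvFeat_ne_empty_iff rr).mpr hlen'
      have hsm : PySem.Str.slice rr (some 1) none ∈ available := by
        rw [← String.toList_inj.mp hseq]
        exact hs
      simp [hne] at hg
      exact hg hsm

-- ===== VERDICT (by name: the statement is the Claim_ definition above) =====
theorem requirements_satisfied_spec : Claim_equal_requirements_satisfied := by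
  intro requirements available _
  unfold Spec_requirements_satisfied
  have key := (a_true_iff requirements available).trans (alt_true_iff requirements available).symm
  cases hA : requirements_satisfied requirements available <;>
    cases hB : requirements_satisfied_alt requirements available <;> simp_all
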